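-- pv_equiv track=rewrite | github.com/ALTA-DE1-Nurul-Kholifah-13Jul1998/Basic-Programming-Part5 | problem3/main.py | join_array_remove_duplicate
-- ===== SOURCE A (Python) =====
-- def join_array_remove_duplicate(arrayA, arrayB):
--     def remove_duplicate(array):
--         hasil = []
--         for i in array:
--             if i not in hasil:
--                 hasil.append(i)
--         return hasil
--
--     arrayA = remove_duplicate(arrayA)
--     arrayB = remove_duplicate(arrayB)
--
--     for i in arrayA:
--         if i in arrayB:
--             arrayB.remove(i)
--     hasil  = arrayA + arrayB
--     return hasil
-- ===== SOURCE B (Python) =====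
-- def join_array_remove_duplicate(arrayA, arrayB):
--     hasil = []
--     for i in arrayA + arrayB:
--         if i not in hasil:
--             hasil.append(i)
--     return hasil
-- ===== Notes on version B (the rewrite author's own statement) =====
-- stated objective: simpler
-- what changed: Replaces three passes (dedup of A, dedup of B, then a removal loop deleting A's elements from B) by a single first-seen deduplication pass over the concatenation arrayA + arrayB.
import Mathlib
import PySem

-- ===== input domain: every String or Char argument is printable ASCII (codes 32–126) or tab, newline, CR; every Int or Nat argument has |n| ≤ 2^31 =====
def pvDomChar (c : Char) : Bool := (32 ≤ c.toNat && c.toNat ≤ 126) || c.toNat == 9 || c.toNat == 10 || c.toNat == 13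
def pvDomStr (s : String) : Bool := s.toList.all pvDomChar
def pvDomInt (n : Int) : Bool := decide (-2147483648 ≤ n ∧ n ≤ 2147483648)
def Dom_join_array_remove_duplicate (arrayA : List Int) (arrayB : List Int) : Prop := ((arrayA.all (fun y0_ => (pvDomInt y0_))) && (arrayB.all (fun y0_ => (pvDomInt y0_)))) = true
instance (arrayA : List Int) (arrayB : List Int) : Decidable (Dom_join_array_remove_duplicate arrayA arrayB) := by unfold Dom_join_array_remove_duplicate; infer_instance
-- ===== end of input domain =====

-- B replaces A's three passes (dedup A, dedup B, remove A's elements from B) by one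
-- first-seen dedup pass over the concatenation arrayA + arrayB (objective: simpler).

-- ===== PORT A =====
-- inner helper remove_duplicate of A
def pvRemoveDuplicate (array : List Int) : List Int :=
  array.foldl (fun hasil i => if i ∈ hasil then hasil else hasil ++ [i]) []

def join_array_remove_duplicate (arrayA : List Int) (arrayB : List Int) : List Int :=
  let arrayA' := pvRemoveDuplicate arrayA
  let arrayB' := pvRemoveDuplicate arrayB
  -- for i in arrayA: if i in arrayB: arrayB.remove(i)  (the none branch is unreachable: guarded by i ∈ b)
  let arrayB'' := arrayA'.foldl
    (fun b i => if i ∈ b then (match PySem.List.remove? b i with | some b' => b' | none => b) else b) arrayB'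
  arrayA' ++ arrayB''

-- ===== PORT B =====
def join_array_remove_duplicate_alt (arrayA : List Int) (arrayB : List Int) : List Int :=
  (arrayA ++ arrayB).foldl (fun hasil i => if i ∈ hasil then hasil else hasil ++ [i]) []

-- ===== PRECONDITION & SPEC =====
def Spec_join_array_remove_duplicate (arrayA : List Int) (arrayB : List Int) (out : List Int) : Prop := out = join_array_remove_duplicate_alt arrayA arrayB
instance (arrayA : List Int) (arrayB : List Int) (out : List Int) : Decidable (Spec_join_array_remove_duplicate arrayA arrayB out) := by unfold Spec_join_array_remove_duplicate; infer_instance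

-- ===== CLAIM (what is proved, stated in full; the proofs are below) =====
def Claim_equal_join_array_remove_duplicate : Prop := ∀ (arrayA : List Int) (arrayB : List Int), Dom_join_array_remove_duplicate arrayA arrayB → Spec_join_array_remove_duplicate arrayA arrayB (join_array_remove_duplicate arrayA arrayB)

-- ===== LEMMAS AND PROOFS =====

-- the common dedup step
def pvStep (hasil : List Int) (i : Int) : List Int := if i ∈ hasil then hasil else hasil ++ [i]

-- the dedup fold started from `acc` is `acc` followed by the fresh elements of the fold from []
theorem pvDed_split (l : List Int) : ∀ acc : List Int,
    l.foldl pvStep acc = acc ++ (l.foldl pvStep []).filter (fun x => decide (x ∉ acc)) := by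
  induction l with
  | nil => intro acc; simp
  | cons i l ih =>
    intro acc
    have hbase : (i :: l).foldl pvStep [] = l.foldl pvStep [i] := by simp [pvStep]
    by_cases hi : i ∈ acc
    · have : (i :: l).foldl pvStep acc = l.foldl pvStep acc := by simp [pvStep, hi]
      rw [this, ih acc, hbase, ih [i], List.filter_append, List.filter_filter]
      have h1 : ([i].filter (fun x => decide (x ∉ acc))) = ([] : List Int) := by simp [hi]
      have h2 : (l.foldl pvStep []).filter (fun x => decide (x ∉ acc) && decide (x ∉ [i]))
          = (l.foldl pvStep []).filter (fun x => decide (x ∉ acc)) := by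
        apply List.filter_congr
        intro x _
        by_cases hxa : x ∈ acc
        · simp [hxa]
        · have hxi : x ≠ i := fun h => hxa (h ▸ hi)
          simp [hxa, hxi]
      rw [h1, h2]; simp
    · have : (i :: l).foldl pvStep acc = l.foldl pvStep (acc ++ [i]) := by simp [pvStep, hi]
      rw [this, ih (acc ++ [i]), hbase, ih [i], List.filter_append, List.filter_filter]
      have h1 : ([i].filter (fun x => decide (x ∉ acc))) = [i] := by simp [hi]
      have h2 : (l.foldl pvStep []).filter (fun x => decide (x ∉ acc) && decide (x ∉ [i]))
          = (l.foldl pvStep []).filter (fun x => decide (x ∉ acc ++ [i])) := by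
        apply List.filter_congr
        intro x _
        simp [List.mem_append, not_or, Bool.and_comm]
      rw [h1, h2]; simp
  
-- the dedup fold preserves Nodup of the accumulator
theorem pvDed_nodup (l : List Int) : ∀ acc : List Int, acc.Nodup → (l.foldl pvStep acc).Nodup := by
  induction l with
  | nil => intro acc h; simpa
  | cons i l ih =>
    intro acc h
    by_cases hi : i ∈ acc
    · have : (i :: l).foldl pvStep acc = l.foldl pvStep acc := by simp [pvStep, hi]
      rw [this]; exact ih acc h
    · have : (i :: l).foldl pvStep acc = l.foldl pvStep (acc ++ [i]) := by simp [pvStep, hi]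
      rw [this]
      exact ih _ (h.append (List.nodup_singleton i) (by simpa using hi))

-- A's removal loop on a duplicate-free list is a filter
theorem pvRemoveLoop_filter (a : List Int) : ∀ db : List Int, db.Nodup →
    a.foldl (fun b i => if i ∈ b then (match PySem.List.remove? b i with | some b' => b' | none => b) else b) db
      = db.filter (fun x => decide (x ∉ a)) := by
  induction a with
  | nil => intro db _; simp
  | cons i a ih =>
    intro db hdb
    have hstep : (if i ∈ db then (match PySem.List.remove? db i with | some b' => b' | none => db) else db)
        = db.erase i := by
      by_cases hi : i ∈ db
      · rw [if_pos hi, PySem.List.remove?_eq_some_erase _ _ hi]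
      · rw [if_neg hi, List.erase_of_not_mem hi]
    rw [List.foldl_cons, hstep, ih (db.erase i) (hdb.erase i),
        List.Nodup.erase_eq_filter hdb, List.filter_filter]
    apply List.filter_congr
    intro x _
    by_cases hxi : x = i <;> simp [hxi, Bool.and_comm]

-- ===== VERDICT (by name: the statement is the Claim_ definition above) =====
theorem join_array_remove_duplicate_spec : Claim_equal_join_array_remove_duplicate := by
  intro arrayA arrayB _
  unfold Spec_join_array_remove_duplicate join_array_remove_duplicate join_array_remove_duplicate_alt pvRemoveDuplicate
  simp only [show (fun (hasil : List Int) (i : Int) => if i ∈ hasil then hasil else hasil ++ [i]) = pvStep from rfl]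
  rw [List.foldl_append, pvDed_split arrayB (List.foldl pvStep [] arrayA)]
  congr 1
  exact pvRemoveLoop_filter (List.foldl pvStep [] arrayA) _ (pvDed_nodup arrayB [] (by simp))
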